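-- pv_equiv track=rewrite | github.com/danishminhas1/arbisoft | q2/encoding.py | code_to_word
-- ===== SOURCE A (Python) =====
-- def code_to_word(chars, s, code_dict):
--     code_list = s.split("0")
--     for i in range(len(code_list)-1):
--         if code_list[i] == '':
--             code_list[i+1] = "0" + code_list[i+1]
--     final_list = list()
--     for i in code_list:
--         if i:
--             final_list.append(i)
--     #initialize final string to return
--     final_string = ""
--     for element in final_list:
--         if element not in code_dict.keys():
--             #return error if not present in dictionary
--             return 'Error'
--         final_string += code_dict[element]
--     return final_string
-- ===== SOURCE B (Python) =====
-- def code_to_word(chars, s, code_dict):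
--     # single left-to-right scan: non-'0' chars extend the current token; a '0'
--     # after an empty segment becomes a leading '0' of the next token, otherwise
--     # it closes the token, which is decoded immediately.
--     result = ""
--     cur = ""
--     for ch in s:
--         if ch != '0':
--             cur += ch
--         elif cur:
--             if cur not in code_dict:
--                 return 'Error'
--             result += code_dict[cur]
--             cur = ""
--         else:
--             cur = "0"
--     if cur:
--         if cur not in code_dict:
--             return 'Error'
--         result += code_dict[cur]
--     return result
-- ===== Notes on version B (the rewrite author's own statement) =====
-- stated objective: alternative
-- what changed: Replaces split('0') + an index-based mutation pass + a filter pass + a decode loop with a single left-to-right character scan that folds the every-other-zero rule into one accumulator and decodes each token as soon as it closes.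
import Mathlib
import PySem

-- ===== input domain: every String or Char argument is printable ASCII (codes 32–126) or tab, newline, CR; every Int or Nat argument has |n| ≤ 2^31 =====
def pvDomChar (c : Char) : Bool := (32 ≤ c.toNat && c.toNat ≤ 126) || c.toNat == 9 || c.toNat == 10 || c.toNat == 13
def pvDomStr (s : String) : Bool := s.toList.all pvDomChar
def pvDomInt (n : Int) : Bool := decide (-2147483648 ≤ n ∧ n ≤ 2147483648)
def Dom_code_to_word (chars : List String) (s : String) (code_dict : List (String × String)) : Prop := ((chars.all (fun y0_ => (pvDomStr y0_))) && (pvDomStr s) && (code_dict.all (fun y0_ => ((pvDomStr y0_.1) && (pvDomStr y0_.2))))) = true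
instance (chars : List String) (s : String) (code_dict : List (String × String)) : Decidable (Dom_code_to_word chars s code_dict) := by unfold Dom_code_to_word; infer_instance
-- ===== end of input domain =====

-- B replaces A's split/mutate/filter/decode passes with one left-to-right scan (same cost, one pass).


-- ===== PORT A =====
-- the final 'for element in final_list' loop of A, with its early 'return Error'
def decodeA : List (List Char) → List (String × String) → String → String
  | [], _, acc => acc
  | e :: rest, d, acc =>
    match d.lookup (String.ofList e) with
    | none => "Error"
    | some v => decodeA rest d (acc ++ v)

def code_to_word (chars : List String) (s : String) (code_dict : List (String × String)) : String :=
  let code_list := PySem.Chars.splitOn s.toList ['0']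
  let code_list := (List.range (code_list.length - 1)).foldl
      (fun cl i => if cl.getD i [] = [] then cl.set (i+1) ('0' :: cl.getD (i+1) []) else cl)
      code_list
  let final_list := code_list.foldl (fun fl i => if i ≠ [] then fl ++ [i] else fl) ([] : List (List Char))
  decodeA final_list code_dict ""

-- ===== PORT B =====
-- B's single scan: res = decoded output so far, cur = current (possibly '0'-led) token
def scanB : List Char → String → List Char → List (String × String) → String
  | [], res, cur, d =>
    if cur ≠ [] then
      match d.lookup (String.ofList cur) with
      | none => "Error"
      | some v => res ++ v
    else res
  | c :: r, res, cur, d =>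
    if c ≠ '0' then scanB r res (cur ++ [c]) d
    else if cur ≠ [] then
      match d.lookup (String.ofList cur) with
      | none => "Error"
      | some v => scanB r (res ++ v) [] d
    else scanB r res ['0'] d

def code_to_word_alt (chars : List String) (s : String) (code_dict : List (String × String)) : String :=
  scanB s.toList "" [] code_dict

-- ===== PRECONDITION & SPEC =====
def Spec_code_to_word (chars : List String) (s : String) (code_dict : List (String × String)) (out : String) : Prop := out = code_to_word_alt chars s code_dict
instance (chars : List String) (s : String) (code_dict : List (String × String)) (out : String) : Decidable (Spec_code_to_word chars s code_dict out) := by unfold Spec_code_to_word; infer_instance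

-- ===== CLAIM (what is proved, stated in full; the proofs are below) =====
def Claim_equal_code_to_word : Prop := ∀ (chars : List String) (s : String) (code_dict : List (String × String)), Dom_code_to_word chars s code_dict → Spec_code_to_word chars s code_dict (code_to_word chars s code_dict)

-- ===== LEMMAS AND PROOFS =====

-- functional model of s.split("0")
def splitZ : List Char → List Char → List (List Char)
  | cur, [] => [cur]
  | cur, c :: r => if c = '0' then cur :: splitZ [] r else splitZ (cur ++ [c]) r

-- functional model of A's in-place mutation loop
def mfMut : List (List Char) → List (List Char)
  | [] => []
  | [p] => [p]
  | p :: q :: r => p :: mfMut ((if p = [] then '0' :: q else q) :: r)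
termination_by l => l.length

theorem go_eq : ∀ (fuel : Nat) (l cur : List Char) (acc : List (List Char)),
    l.length < fuel →
    PySem.Chars.splitOn.go ['0'] fuel l cur acc = acc.reverse ++ splitZ cur.reverse l := by
  intro fuel
  induction fuel with
  | zero => intro l cur acc h; omega
  | succ n ih =>
    intro l cur acc h
    cases l with
    | nil =>
      rw [PySem.Chars.splitOn.go]
      · simp [splitZ]
      · omega
    | cons c rest =>
      rw [PySem.Chars.splitOn.go]
      by_cases hc : c = '0'
      · subst hc
        have hp : List.isPrefixOf ['0'] ('0' :: rest) = true := by
          simp [List.isPrefixOf]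
        simp only [hp, if_true, List.length_cons, List.drop_succ_cons, List.length_nil, List.drop_zero]
        rw [ih rest [] (cur.reverse :: acc) (by simpa using h)]
        simp [splitZ]
      · have hp : List.isPrefixOf ['0'] (c :: rest) = false := by
          simp [List.isPrefixOf]; intro hcc; exact absurd hcc.symm hc
        simp only [hp, Bool.false_eq_true, if_false]
        rw [ih rest (c :: cur) acc (by simpa using h)]
        simp [splitZ, hc]

theorem splitOn_eq (cs : List Char) : PySem.Chars.splitOn cs ['0'] = splitZ [] cs := by
  rw [PySem.Chars.splitOn]
  rw [go_eq (cs.length + 1) cs [] [] (by omega)]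
  simp

theorem splitZ_shape : ∀ (r cur : List Char),
    splitZ cur r = (cur ++ (splitZ [] r).headI) :: (splitZ [] r).tail := by
  intro r
  induction r with
  | nil => intro cur; simp [splitZ]
  | cons c t ih =>
    intro cur
    by_cases hc : c = '0'
    · simp [splitZ, hc]
    · rw [show splitZ cur (c :: t) = splitZ (cur ++ [c]) t by simp [splitZ, hc],
          show splitZ [] (c :: t) = splitZ [c] t by simp [splitZ, hc],
          ih (cur ++ [c]), ih [c]]
      simp

theorem getD_append_len : ∀ (pre : List (List Char)) (t : List (List Char)) (p : List Char),
    (pre ++ p :: t).getD pre.length [] = p := by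
  intro pre
  induction pre with
  | nil => intro t p; simp
  | cons a pre ih => intro t p; simpa using ih t p

theorem set_append_len : ∀ (pre : List (List Char)) (r : List (List Char)) (p q x : List Char),
    (pre ++ p :: q :: r).set (pre.length + 1) x = pre ++ p :: x :: r := by
  intro pre
  induction pre with
  | nil => intro r p q x; simp
  | cons a pre ih => intro r p q x; simpa using ih r p q x

theorem mutLoop_eq : ∀ (cl pre : List (List Char)),
    (List.range' pre.length (cl.length - 1)).foldl
      (fun cl i => if cl.getD i [] = [] then cl.set (i+1) ('0' :: cl.getD (i+1) []) else cl)
      (pre ++ cl) = pre ++ mfMut cl := by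
  intro cl
  induction cl using mfMut.induct with
  | case1 => intro pre; simp [mfMut]
  | case2 p => intro pre; simp [mfMut]
  | case3 p q r ih =>
    intro pre
    have hrange : List.range' pre.length ((p :: q :: r).length - 1)
        = pre.length :: List.range' (pre.length + 1) (r.length + 1 - 1) := by
      simp [List.range'_succ]
    rw [hrange]
    simp only [List.foldl_cons]
    rw [getD_append_len pre (q :: r) p]
    by_cases hp : p = []
    · rw [if_pos hp]
      have hgd : (pre ++ p :: q :: r).getD (pre.length + 1) [] = q := by
        have := getD_append_len (pre ++ [p]) r q
        simpa using this
      rw [hgd, set_append_len]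
      have h2 : pre ++ p :: ('0' :: q) :: r = (pre ++ [p]) ++ ('0' :: q) :: r := by simp
      rw [h2]
      have h3 : (pre ++ [p]).length = pre.length + 1 := by simp
      rw [← h3]
      have := ih (pre ++ [p])
      rw [dif_pos hp] at this
      simp only [List.length_cons] at this ⊢
      rw [this]
      rw [mfMut, if_pos hp]
      simp
    · rw [if_neg hp]
      have h2 : pre ++ p :: q :: r = (pre ++ [p]) ++ q :: r := by simp
      rw [h2]
      have h3 : (pre ++ [p]).length = pre.length + 1 := by simp
      rw [← h3]
      have := ih (pre ++ [p])
      rw [dif_neg hp] at this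
      simp only [List.length_cons] at this ⊢
      rw [this]
      rw [mfMut, if_neg hp]
      simp

theorem filter_loop : ∀ (cl fl : List (List Char)),
    cl.foldl (fun fl i => if i ≠ [] then fl ++ [i] else fl) fl = fl ++ cl.filter (· ≠ []) := by
  intro cl
  induction cl with
  | nil => intro fl; simp
  | cons a t ih =>
    intro fl
    rw [List.foldl_cons]
    by_cases ha : a = []
    · rw [if_neg (not_not_intro ha), ih, List.filter_cons]
      simp [ha]
    · rw [if_pos ha, ih, List.filter_cons]
      simp [ha]

theorem main_eq : ∀ (cs cur : List Char) (res : String) (d : List (String × String)),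
    scanB cs res cur d = decodeA ((mfMut (splitZ cur cs)).filter (· ≠ [])) d res := by
  intro cs
  induction cs with
  | nil =>
    intro cur res d
    by_cases hcur : cur = []
    · simp [scanB, splitZ, mfMut, hcur, decodeA]
    · cases hl : d.lookup (String.ofList cur) with
      | none => simp [scanB, splitZ, mfMut, hcur, decodeA, hl]
      | some v => simp [scanB, splitZ, mfMut, hcur, decodeA, hl]
  | cons c r ih =>
    intro cur res d
    by_cases hc : c = '0'
    · subst hc
      by_cases hcur : cur = []
      · subst hcur
        rw [show scanB ('0' :: r) res [] d = scanB r res ['0'] d by simp [scanB]]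
        rw [ih ['0'] res d]
        rw [splitZ_shape r ['0']]
        rw [show splitZ [] ('0' :: r) = [] :: splitZ [] r by simp [splitZ]]
        rw [splitZ_shape r []]
        simp only [List.nil_append]
        rw [show mfMut ([] :: (splitZ [] r).headI :: (splitZ [] r).tail)
              = [] :: mfMut (('0' :: (splitZ [] r).headI) :: (splitZ [] r).tail) by
            rw [mfMut]; simp]
        simp [List.filter]
      · have hr : splitZ [] r = (splitZ [] r).headI :: (splitZ [] r).tail := by
          simpa using splitZ_shape r []
        rw [show splitZ cur ('0' :: r) = cur :: splitZ [] r by simp [splitZ]]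
        rw [hr]
        rw [show mfMut (cur :: (splitZ [] r).headI :: (splitZ [] r).tail)
              = cur :: mfMut ((splitZ [] r).headI :: (splitZ [] r).tail) by
            rw [mfMut, if_neg hcur]]
        rw [← hr]
        rw [show (cur :: mfMut (splitZ [] r)).filter (· ≠ [])
              = cur :: (mfMut (splitZ [] r)).filter (· ≠ []) by simp [List.filter, hcur]]
        cases hl : d.lookup (String.ofList cur) with
        | none => simp [scanB, hl, decodeA, hcur]
        | some v =>
          rw [show scanB ('0' :: r) res cur d = scanB r (res ++ v) [] d by
              simp [scanB, hcur, hl]]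
          rw [ih [] (res ++ v) d]
          simp [decodeA, hl]
    · rw [show scanB (c :: r) res cur d = scanB r res (cur ++ [c]) d by simp [scanB, hc]]
      rw [show splitZ cur (c :: r) = splitZ (cur ++ [c]) r by simp [splitZ, hc]]
      exact ih (cur ++ [c]) res d

-- ===== VERDICT (by name: the statement is the Claim_ definition above) =====
theorem code_to_word_spec : Claim_equal_code_to_word := by
  intro chars s code_dict _
  unfold Spec_code_to_word
  simp only [code_to_word, code_to_word_alt]
  rw [splitOn_eq]
  rw [show List.range ((splitZ [] s.toList).length - 1)
        = List.range' (List.length ([] : List (List Char))) ((splitZ [] s.toList).length - 1) by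
      simp [List.range_eq_range']]
  rw [show (List.range' (List.length ([] : List (List Char)))
        ((splitZ [] s.toList).length - 1)).foldl
        (fun cl i => if cl.getD i [] = [] then cl.set (i+1) ('0' :: cl.getD (i+1) []) else cl)
        (splitZ [] s.toList)
      = ([] : List (List Char)) ++ mfMut (splitZ [] s.toList) by
      have := mutLoop_eq (splitZ [] s.toList) []
      simpa using this]
  rw [List.nil_append, filter_loop, main_eq]
  simp
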